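-- pv_equiv track=rewrite | github.com/hannakathryn/590-HKB9 | HW5.0/WIKI/01-clean_wiki.py | form_dictionary
-- ===== SOURCE A (Python) =====
-- def form_dictionary(samples):
--     token_index = {};
--     #FORM DICTIONARY WITH WORD INDICE MAPPINGS
--     for sample in samples:
--         for word in sample.split(' '):
--             if word not in token_index:
--                 token_index[word] = len(token_index) + 1
--
--     transformed_text=list()
--     for sample in samples:
--         tmp=list()
--         for word in sample.split(' '):
--             tmp.append(token_index[word])
--         transformed_text.append(tmp)
--
--     return [token_index,transformed_text]
-- ===== SOURCE B (Python) =====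
-- def form_dictionary(samples):
--     # Single fused pass: build the index and tokenize each sample together.
--     token_index = {}
--     transformed_text = []
--     for sample in samples:
--         tmp = []
--         for word in sample.split(' '):
--             if word not in token_index:
--                 token_index[word] = len(token_index) + 1
--             tmp.append(token_index[word])
--         transformed_text.append(tmp)
--     return [token_index, transformed_text]
-- ===== Notes on version B (the rewrite author's own statement) =====
-- stated objective: simpler
-- what changed: B fuses A's two separate full passes (build dict, then re-split and translate) into one interleaved pass that splits each sample once, assigning an index on first sight and emitting it immediately.
import Mathlib
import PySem

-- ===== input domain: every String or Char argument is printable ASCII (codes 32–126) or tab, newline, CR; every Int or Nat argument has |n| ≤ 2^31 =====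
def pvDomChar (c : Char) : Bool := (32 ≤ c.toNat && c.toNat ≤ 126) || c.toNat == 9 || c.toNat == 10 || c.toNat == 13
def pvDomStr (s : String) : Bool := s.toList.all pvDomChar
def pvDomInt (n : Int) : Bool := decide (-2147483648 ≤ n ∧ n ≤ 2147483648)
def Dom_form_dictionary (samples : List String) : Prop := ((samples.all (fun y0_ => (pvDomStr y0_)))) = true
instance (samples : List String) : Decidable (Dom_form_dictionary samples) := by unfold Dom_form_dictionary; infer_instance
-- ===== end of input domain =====

-- B fuses A's two passes (build dictionary, then re-split and translate) into one interleaved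
-- pass with a single split per sample; same return value, proved equal below.

-- shared primitives both Pythons contain verbatim:
-- sample.split(' ')  (sep " " is non-empty, so split? never returns none)
def fdSplit (s : String) : List String := (PySem.Str.split? s " ").getD []
-- if word not in token_index: token_index[word] = len(token_index) + 1
def fdStep (d : PySem.Dict String Int) (word : String) : PySem.Dict String Int :=
  if d.contains word then d else d.insert word ((d.size : Int) + 1)

-- ===== PORT A =====
-- two passes: first builds token_index, then re-splits each sample and translates it via lookups
def form_dictionary (samples : List String) : (List (String × Int)) × List (List Int) :=
  let token_index : PySem.Dict String Int :=
    samples.foldl (fun d sample => (fdSplit sample).foldl fdStep d) PySem.Dict.empty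
  let transformed_text : List (List Int) :=
    samples.foldl (fun acc sample =>
      let tmp : List Int :=
        (fdSplit sample).foldl (fun tmp word =>
          -- token_index[word]: KeyError impossible, every word was inserted in the first pass,
          -- so getD's default 0 is never used
          tmp ++ [token_index.getD word 0]) []
      acc ++ [tmp]) []
  (token_index.items, transformed_text)

-- ===== PORT B =====
-- one fused pass: assign the index on first sight, emit it immediately
def fdInnerStep (st2 : PySem.Dict String Int × List Int) (word : String) :
    PySem.Dict String Int × List Int :=
  let d := fdStep st2.1 word
  (d, st2.2 ++ [d.getD word 0])

def fdOuterStep (st : PySem.Dict String Int × List (List Int)) (sample : String) :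
    PySem.Dict String Int × List (List Int) :=
  let inner := (fdSplit sample).foldl fdInnerStep (st.1, [])
  (inner.1, st.2 ++ [inner.2])

def form_dictionary_alt (samples : List String) : (List (String × Int)) × List (List Int) :=
  let res := samples.foldl fdOuterStep (PySem.Dict.empty, [])
  (res.1.items, res.2)

-- ===== PRECONDITION & SPEC =====
def Spec_form_dictionary (samples : List String) (out : (List (String × Int)) × List (List Int)) : Prop := out = form_dictionary_alt samples
instance (samples : List String) (out : (List (String × Int)) × List (List Int)) : Decidable (Spec_form_dictionary samples out) := by unfold Spec_form_dictionary; infer_instance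

-- ===== CLAIM (what is proved, stated in full; the proofs are below) =====
def Claim_equal_form_dictionary : Prop := ∀ (samples : List String), Dom_form_dictionary samples → Spec_form_dictionary samples (form_dictionary samples)

-- ===== LEMMAS AND PROOFS =====

-- the dictionary after processing one sample's words / all samples
def fdWords (d : PySem.Dict String Int) (ws : List String) : PySem.Dict String Int :=
  ws.foldl fdStep d

def fdAll (d : PySem.Dict String Int) (samples : List String) : PySem.Dict String Int :=
  samples.foldl (fun d sample => (fdSplit sample).foldl fdStep d) d

-- "D extends d": every binding of d is still in D (the dict only grows, values never change)
def FdExt (d D : PySem.Dict String Int) : Prop :=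
  ∀ w v, d.get? w = some v → D.get? w = some v

theorem fdExt_refl (d : PySem.Dict String Int) : FdExt d d := fun _ _ h => h

theorem fdExt_trans {a b c : PySem.Dict String Int} (h1 : FdExt a b) (h2 : FdExt b c) : FdExt a c :=
  fun w v h => h2 w v (h1 w v h)

theorem fdExt_step (d : PySem.Dict String Int) (w : String) : FdExt d (fdStep d w) := by
  intro w' v h
  unfold fdStep
  split
  · exact h
  · rename_i hc
    rcases eq_or_ne w' w with rfl | hne
    · exact absurd (by rw [PySem.Dict.contains_eq_isSome_get?, h]; rfl) hc
    · rwa [PySem.Dict.get?_insert_of_ne _ _ hne]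

theorem fdExt_words (d : PySem.Dict String Int) (ws : List String) : FdExt d (fdWords d ws) := by
  induction ws generalizing d with
  | nil => exact fdExt_refl d
  | cons w ws ih => exact fdExt_trans (fdExt_step d w) (ih (fdStep d w))

theorem fdExt_all (d : PySem.Dict String Int) (samples : List String) : FdExt d (fdAll d samples) := by
  induction samples generalizing d with
  | nil => exact fdExt_refl d
  | cons s ss ih => exact fdExt_trans (fdExt_words d (fdSplit s)) (ih _)

theorem fdStep_get_self (d : PySem.Dict String Int) (w : String) :
    ∃ v, (fdStep d w).get? w = some v := by
  unfold fdStep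
  split
  · rename_i hc
    rw [PySem.Dict.contains_eq_isSome_get?] at hc
    exact Option.isSome_iff_exists.mp hc
  · exact ⟨_, PySem.Dict.get?_insert_self _ _ _⟩

-- B's inner loop: dictionary = fdWords, tokens = lookups in ANY extension D of the result
theorem fdInnerB (ws : List String) (d : PySem.Dict String Int) (tmp : List Int)
    (D : PySem.Dict String Int) (hD : FdExt (fdWords d ws) D) :
    ws.foldl fdInnerStep (d, tmp) = (fdWords d ws, tmp ++ ws.map (fun w => D.getD w 0)) := by
  induction ws generalizing d tmp with
  | nil => simp [fdWords]
  | cons w ws ih =>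
    have hws : fdWords d (w :: ws) = fdWords (fdStep d w) ws := rfl
    rw [hws] at hD
    obtain ⟨v, hv⟩ := fdStep_get_self d w
    have hDv : D.get? w = some v := hD w v (fdExt_words (fdStep d w) ws w v hv)
    have hval : (fdStep d w).getD w 0 = D.getD w 0 := by
      rw [PySem.Dict.getD_of_get?_eq_some _ 0 hv, PySem.Dict.getD_of_get?_eq_some _ 0 hDv]
    simp only [List.foldl_cons, List.map_cons]
    rw [show fdInnerStep (d, tmp) w = (fdStep d w, tmp ++ [(fdStep d w).getD w 0]) from rfl]
    rw [ih (fdStep d w) _ hD, hws, hval]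
    simp

-- B's outer loop in terms of fdAll and lookups in an extension D of the final dictionary
theorem fdOuterB (samples : List String) (d : PySem.Dict String Int) (acc : List (List Int))
    (D : PySem.Dict String Int) (hD : FdExt (fdAll d samples) D) :
    samples.foldl fdOuterStep (d, acc)
      = (fdAll d samples,
         acc ++ samples.map (fun s => (fdSplit s).map (fun w => D.getD w 0))) := by
  induction samples generalizing d acc with
  | nil => simp [fdAll]
  | cons s ss ih =>
    have hall : fdAll d (s :: ss) = fdAll (fdWords d (fdSplit s)) ss := rfl
    rw [hall] at hD
    have hExtInner : FdExt (fdWords d (fdSplit s)) D := fdExt_trans (fdExt_all _ ss) hD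
    simp only [List.foldl_cons, List.map_cons]
    rw [show fdOuterStep (d, acc) s
        = (((fdSplit s).foldl fdInnerStep (d, [])).1,
           acc ++ [((fdSplit s).foldl fdInnerStep (d, [])).2]) from rfl]
    rw [fdInnerB (fdSplit s) d [] D hExtInner]
    rw [ih (fdWords d (fdSplit s)) _ hD, hall]
    simp

-- A's first pass IS fdAll; A's translation pass rewritten as a map
theorem fdA_eq (samples : List String) :
    form_dictionary samples
      = ((fdAll PySem.Dict.empty samples).items,
         samples.map (fun s => (fdSplit s).map
           (fun w => (fdAll PySem.Dict.empty samples).getD w 0))) := by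
  unfold form_dictionary
  simp only [PySem.List.foldl_append_singleton_eq_map, List.nil_append]
  rfl

theorem fdB_eq (samples : List String) :
    form_dictionary_alt samples
      = ((fdAll PySem.Dict.empty samples).items,
         samples.map (fun s => (fdSplit s).map
           (fun w => (fdAll PySem.Dict.empty samples).getD w 0))) := by
  unfold form_dictionary_alt
  rw [fdOuterB samples PySem.Dict.empty [] (fdAll PySem.Dict.empty samples)
      (fdExt_refl (fdAll PySem.Dict.empty samples))]
  simp

-- ===== VERDICT (by name: the statement is the Claim_ definition above) =====
theorem form_dictionary_spec : Claim_equal_form_dictionary := by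
  intro samples _
  unfold Spec_form_dictionary
  rw [fdA_eq, fdB_eq]
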